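-- pv_equiv track=rewrite | github.com/bbbii/algorithm-for-coding-test | program/level1/과일 장수.py | solution
-- ===== SOURCE A (Python) =====
-- def solution(k, m, score):
--     answer = 0
--     a = sorted(score)
--     a.reverse()
--     for i in range(0, len(a), m):
--         b = a[i:i + m]
--         if len(b) == m:
--             answer += min(b) * len(b)
--     return answer
-- ===== SOURCE B (Python) =====
-- def solution(k, m, score):
--     s = sorted(score)
--     n = len(s)
--     return m * sum(s[n - t * m] for t in range(1, n // m + 1))
-- ===== Notes on version B (the rewrite author's own statement) =====
-- stated objective: alternative
-- what changed: A sorts, reverses, and loops over m-sized slices taking min() of each full chunk; B sorts once ascending and directly sums every m-th element from the top (s[n - t*m] for t = 1..n//m) with no reverse, no slicing and no min scans.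
-- outside the precondition, e.g. on solution(4, 0, [1, 2, 3]): A raises ValueError, B raises ZeroDivisionError
import Mathlib
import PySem

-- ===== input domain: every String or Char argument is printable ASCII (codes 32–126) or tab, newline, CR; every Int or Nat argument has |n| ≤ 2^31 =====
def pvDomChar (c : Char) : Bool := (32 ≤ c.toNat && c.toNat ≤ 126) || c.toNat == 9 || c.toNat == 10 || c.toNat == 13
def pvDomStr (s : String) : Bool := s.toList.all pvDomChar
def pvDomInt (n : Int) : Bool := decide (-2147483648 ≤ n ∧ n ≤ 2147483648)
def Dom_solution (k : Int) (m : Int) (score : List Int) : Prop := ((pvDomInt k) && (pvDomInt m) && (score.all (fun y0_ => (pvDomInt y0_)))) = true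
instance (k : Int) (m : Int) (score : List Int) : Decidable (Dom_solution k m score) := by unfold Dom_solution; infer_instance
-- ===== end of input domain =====

-- B replaces A's chunking (slice each m-block of the descending-sorted list and take its min)
-- by one ascending sort and a direct sum of every m-th element from the top: answer = m * Σ_{t=1..n//m} s[n - t*m].

-- ===== PORT A =====
-- Literal port of A: sort ascending, reverse, loop i over range(0, len, m),
-- slice b = a[i:i+m], and when len(b) == m add min(b) * len(b).
-- '(min? b).getD 0' is only read under the guard len(b) = m with the loop running (m ≥ 1),
-- where b is nonempty, so Python's min never raises there.
def solution (k : Int) (m : Int) (score : List Int) : Int :=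
  let a := (PySem.List.sorted score (fun x => x)).reverse
  (PySem.List.pyRange 0 (a.length : Int) m).foldl
    (fun answer i =>
      let b := PySem.List.slice a (some i) (some (i + m))
      if (b.length : Int) = m then answer + (PySem.List.min? b (fun x => x)).getD 0 * (b.length : Int)
      else answer)
    0

-- ===== PORT B =====
-- Literal port of B: s = sorted(score); n = len(s); m * sum(s[n - t*m] for t in range(1, n//m + 1)).
-- pyGetD with default 0 stands for s[n - t*m]; for every t the generator produces the index is in range.
def solution_alt (k : Int) (m : Int) (score : List Int) : Int :=
  let s := PySem.List.sorted score (fun x => x)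
  let n : Int := s.length
  m * ((PySem.List.pyRange 1 (PySem.Int.floordiv n m + 1) 1).map
        (fun t => PySem.List.pyGetD s (n - t * m) 0)).sum

-- ===== PRECONDITION & SPEC =====
-- Pre_ excludes exactly m = 0, where Python A raises ValueError (range step 0)
-- and Python B raises ZeroDivisionError (n // 0).
def Pre_solution (k : Int) (m : Int) (score : List Int) : Prop := m ≠ 0
instance (k : Int) (m : Int) (score : List Int) : Decidable (Pre_solution k m score) := by unfold Pre_solution; infer_instance

def pvWitness_solution : Int × Int × List Int := (4, 2, [1, 2, 3, 1, 2])

def Spec_solution (k : Int) (m : Int) (score : List Int) (out : Int) : Prop := out = solution_alt k m score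
instance (k : Int) (m : Int) (score : List Int) (out : Int) : Decidable (Spec_solution k m score out) := by unfold Spec_solution; infer_instance

-- ===== CLAIM (what is proved, stated in full; the proofs are below) =====
def Claim_equal_solution : Prop := ∀ (k : Int) (m : Int) (score : List Int), Dom_solution k m score → Pre_solution k m score → Spec_solution k m score (solution k m score)

-- ===== LEMMAS AND PROOFS =====

-- min of a nonincreasing nonempty list (Python's min: the minimal value) is the value of its last element
lemma min_getD_of_desc (l : List Int) (h : l.Pairwise (fun x y => y ≤ x)) (hne : l ≠ []) :
    (PySem.List.min? l (fun x => x)).getD 0 = l.getLast hne := by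
  have hlen : 0 < l.length := List.length_pos_iff.mpr hne
  obtain ⟨v, hv⟩ : ∃ v, PySem.List.min? l (fun x => x) = some v := by
    cases hmin : PySem.List.min? l (fun x => x) with
    | none => exact absurd ((PySem.List.min?_eq_none_iff l _).mp hmin) hne
    | some v => exact ⟨v, rfl⟩
  rw [hv, Option.getD_some]
  have hmem := PySem.List.min?_mem hv
  have hmin := PySem.List.min?_isMin hv
  have hlast : l.getLast hne = l[l.length - 1] := List.getLast_eq_getElem hne
  obtain ⟨i, hi, hvi⟩ := List.getElem_of_mem hmem
  have hge : l.getLast hne ≤ v := by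
    rw [hlast]
    rcases Nat.lt_or_ge i (l.length - 1) with hlt | hge
    · have := (List.pairwise_iff_getElem.mp h) i (l.length - 1) hi (by omega) hlt
      simpa [hvi] using this
    · have : i = l.length - 1 := by omega
      subst this; simp [hvi]
  have hle : v ≤ l.getLast hne := hmin _ (List.getLast_mem hne)
  omega

-- A's loop body, for a full chunk starting at i = m*j of the reversed sorted list,
-- yields the sorted list's element at position n - (j+1)*m
lemma chunk_eq (s : List Int) (hs : s.Pairwise (fun x y : Int => x ≤ y)) (m : Int) (hm : 0 < m)
    (j : Nat) (hin : m * (j : Int) + m ≤ (s.length : Int)) :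
    (PySem.List.min? (PySem.List.slice s.reverse (some (m * (j : Int))) (some (m * (j : Int) + m)))
        (fun x => x)).getD 0
      = PySem.List.pyGetD s ((s.length : Int) - (1 + (j : Int)) * m) 0 := by
  set n := s.length with hn
  have hi0 : (0 : Int) ≤ m * (j : Int) := by positivity
  have hb : PySem.List.slice s.reverse (some (m * (j : Int))) (some (m * (j : Int) + m))
      = (s.reverse.drop (m * (j : Int)).toNat).take ((m * (j : Int) + m).toNat - (m * (j : Int)).toNat) := by
    apply PySem.List.slice_of_nonneg s.reverse hi0 (by omega) <;> simp <;> omega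
  have hmn : (m * (j : Int)).toNat + m.toNat ≤ n := by omega
  have htn : (m * (j : Int) + m).toNat - (m * (j : Int)).toNat = m.toNat := by omega
  rw [hb, htn]
  set i := (m * (j : Int)).toNat with hidef
  have hlenb : ((s.reverse.drop i).take m.toNat).length = m.toNat := by
    simp [List.length_take, List.length_drop]; omega
  have hbne : (s.reverse.drop i).take m.toNat ≠ [] := by
    intro hnil; rw [hnil] at hlenb; simp at hlenb; omega
  have hdesc : ((s.reverse.drop i).take m.toNat).Pairwise (fun x y => y ≤ x) := by
    have := (List.pairwise_reverse.mpr (by simpa using hs) : s.reverse.Pairwise (fun x y => y ≤ x))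
    exact this.sublist ((List.take_sublist _ _).trans (List.drop_sublist _ _))
  rw [min_getD_of_desc _ hdesc hbne]
  have hidx0 : (0:Int) ≤ (n : Int) - (1 + (j : Int)) * m := by nlinarith
  have hidxlt : (n : Int) - (1 + (j : Int)) * m < (n : Int) := by nlinarith
  rw [PySem.List.pyGetD_eq_getElem s 0 hidx0 hidxlt]
  rw [List.getLast_eq_getElem]
  have h1 : m.toNat - 1 < ((s.reverse.drop i).take m.toNat).length := by omega
  rw [List.getElem_take (h := by simpa [hlenb] using h1)]
  rw [List.getElem_drop (h := by simp; omega)]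
  rw [List.getElem_reverse (h := by simp; omega)]
  congr 1
  have him : ((i : Nat) : Int) = m * (j : Int) := Int.toNat_of_nonneg hi0
  have hmt : ((m.toNat : Nat) : Int) = m := Int.toNat_of_nonneg hm.le
  have hexp : ((n : Int)) - (1 + (j:Int)) * m = (n : Int) - (m * (j : Int) + m) := by ring_nf
  rw [hexp]
  simp [hlenb]
  omega

-- the guard len(a[i:i+m]) == m says exactly that the chunk fits: i + m <= n
lemma cond_iff (s : List Int) (m i : Int) (hm : 0 < m) (h0 : 0 ≤ i) (hiN : i < (s.length : Int)) :
    (((PySem.List.slice s.reverse (some i) (some (i + m))).length : Int) = m) ↔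
      i + m ≤ (s.length : Int) := by
  rw [PySem.List.length_slice]
  simp [PySem.List.clampIdx]
  split_ifs <;> push_cast <;> omega

lemma solution_eq_alt (k : Int) (m : Int) (score : List Int) (hm : m ≠ 0) :
    solution k m score = solution_alt k m score := by
  unfold solution solution_alt
  simp only [List.length_reverse]
  set s := PySem.List.sorted score (fun x => x) with hsdef
  have hs : s.Pairwise (fun x y : Int => x ≤ y) := PySem.List.sorted_pairwise score _
  set N : Int := (s.length : Int) with hN
  have hN0 : 0 ≤ N := by positivity
  rcases hm.lt_or_gt with hneg | hpos
  · -- m < 0 : both sides are 0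
    have hA : PySem.List.pyRange 0 N m = [] := by
      simp only [PySem.List.pyRange, if_neg hm]
      rw [if_neg (by omega), if_neg (by omega)]
      simp
    have hq : PySem.Int.floordiv N m + 1 ≤ 1 := by
      have h1 := PySem.Int.floordiv_mul_add_mod N m
      have h2 := PySem.Int.mod_neg_bounds N hneg
      nlinarith [h1, h2.1, h2.2]
    have hB : PySem.List.pyRange 1 (PySem.Int.floordiv N m + 1) 1 = [] :=
      PySem.List.pyRange_one_eq_nil hq
    rw [hA, hB]; simp
  · -- m > 0
    rw [PySem.Int.floordiv_eq_ediv_of_pos hpos]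
    set q : Int := N / m with hq
    have hq0 : 0 ≤ q := Int.ediv_nonneg hN0 hpos.le
    have hmod := Int.emod_nonneg N (by omega : m ≠ 0)
    have hmodlt := Int.emod_lt_of_pos N hpos
    have hsplit := Int.mul_ediv_add_emod N m
    -- B side: a sum over range q.toNat
    have hB : m * ((PySem.List.pyRange 1 (q + 1) 1).map
          (fun t => PySem.List.pyGetD s (N - t * m) 0)).sum
        = m * ((List.range q.toNat).map
          (fun (j : Nat) => PySem.List.pyGetD s (N - (1 + (j : Int)) * m) 0)).sum := by
      have h1 : q + 1 - 1 = q := by ring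
      rw [PySem.List.pyRange_one, h1, List.map_map]
      rfl
    rw [hB]
    -- A side
    rw [PySem.List.pyRange_of_pos 0 N hpos, List.foldl_map]
    have hfun : (fun (answer : Int) (k : Nat) =>
          if (((PySem.List.slice s.reverse (some (0 + m * (k : Int)))
                (some (0 + m * (k : Int) + m))).length : Int) = m) then
            answer + (PySem.List.min? (PySem.List.slice s.reverse (some (0 + m * (k : Int)))
                (some (0 + m * (k : Int) + m))) (fun x => x)).getD 0 *
              ((PySem.List.slice s.reverse (some (0 + m * (k : Int)))
                (some (0 + m * (k : Int) + m))).length : Int)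
          else answer)
        = (fun (answer : Int) (k : Nat) => answer +
            (if (((PySem.List.slice s.reverse (some (m * (k : Int)))
                  (some (m * (k : Int) + m))).length : Int) = m) then
              (PySem.List.min? (PySem.List.slice s.reverse (some (m * (k : Int)))
                  (some (m * (k : Int) + m))) (fun x => x)).getD 0 * m
            else 0)) := by
      funext answer k
      simp only [zero_add]
      split_ifs with h
      · rw [h]
      · simp
    rw [hfun, PySem.List.foldl_add, zero_add]
    -- now both are sums over List.range
    have hmq : m * q = N - N % m := by rw [hq]; linarith [hsplit]
    have hqmN : q * m ≤ N := by nlinarith [hmq]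
    have hterm : ∀ j ∈ List.range q.toNat,
        (if (((PySem.List.slice s.reverse (some (m * (j : Int)))
              (some (m * (j : Int) + m))).length : Int) = m) then
          (PySem.List.min? (PySem.List.slice s.reverse (some (m * (j : Int)))
              (some (m * (j : Int) + m))) (fun x => x)).getD 0 * m
        else 0)
          = PySem.List.pyGetD s (N - (1 + (j : Int)) * m) 0 * m := by
      intro j hj
      rw [List.mem_range] at hj
      have hjq : (j : Int) + 1 ≤ q := by omega
      have hin : m * (j : Int) + m ≤ N := by nlinarith [mul_le_mul_of_nonneg_right hjq hpos.le, hmq]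
      have hi0 : (0 : Int) ≤ m * (j : Int) := by positivity
      have hiN : m * (j : Int) < N := by omega
      rw [if_pos ((cond_iff s m _ hpos hi0 hiN).mpr hin), chunk_eq s hs m hpos j hin]
    rcases eq_or_lt_of_le hN0 with hN0' | hNpos
    · -- empty list
      have hq0' : q = 0 := by rw [hq]; rw [← hN0']; simp
      rw [if_neg (by omega), hq0']
      simp
    · rw [if_pos hNpos]
      simp only [sub_zero]
      by_cases hdvd : N % m = 0
      · have hC : (N + m - 1) / m = q := by
          have h2 : PySem.Int.floordiv (N + m - 1) m = q := by
            rw [PySem.Int.floordiv_eq_iff_of_pos hpos]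
            constructor <;> nlinarith [hmq]
          rw [PySem.Int.floordiv_eq_ediv_of_pos hpos] at h2
          exact h2
        rw [hC, List.map_congr_left hterm, List.sum_map_mul_right, mul_comm]
      · have hC : (N + m - 1) / m = q + 1 := by
          have h2 : PySem.Int.floordiv (N + m - 1) m = q + 1 := by
            rw [PySem.Int.floordiv_eq_iff_of_pos hpos]
            have hr1 : 1 ≤ N % m := by omega
            constructor <;> nlinarith [hmq, hr1]
          rw [PySem.Int.floordiv_eq_ediv_of_pos hpos] at h2
          exact h2
        have hCtn : ((N + m - 1) / m).toNat = q.toNat + 1 := by omega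
        rw [hC]
        rw [show (q + 1).toNat = q.toNat + 1 by omega]
        rw [List.range_succ, List.map_append, List.sum_append]
        have hlast : (if (((PySem.List.slice s.reverse (some (m * (q.toNat : Int)))
              (some (m * (q.toNat : Int) + m))).length : Int) = m) then
            (PySem.List.min? (PySem.List.slice s.reverse (some (m * (q.toNat : Int)))
                (some (m * (q.toNat : Int) + m))) (fun x => x)).getD 0 * m
          else 0) = 0 := by
          rw [if_neg]
          intro hcond
          have hqc : ((q.toNat : Nat) : Int) = q := by omega
          have hi0 : (0 : Int) ≤ m * ((q.toNat : Nat) : Int) := by positivity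
          have hiN : m * ((q.toNat : Nat) : Int) < N := by
            rw [hqc]; nlinarith [hmq, (by omega : 1 ≤ N % m)]
          have := (cond_iff s m _ hpos hi0 hiN).mp hcond
          rw [hqc] at this
          nlinarith [hmq, hmodlt, this]
        simp only [List.map_cons, List.map_nil, List.sum_cons, List.sum_nil] at *
        rw [hlast]
        rw [List.map_congr_left hterm, List.sum_map_mul_right, mul_comm]
        ring

-- ===== VERDICT (by name: the statement is the Claim_ definition above) =====
theorem solution_spec : Claim_equal_solution := by
  intro k m score _ hpre
  exact solution_eq_alt k m score hpre
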